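-- pv_equiv track=rewrite | github.com/Bheinarl/algorithm_course_in_ss_afy | day3_swea_pb16268풍선팡2.py | max_balloon_pop_wsad
-- ===== SOURCE A (Python) =====
-- def max_balloon_pop_wsad(N,M,arr): # 상, 하, 좌, 우 값이 존재할 때, 자기자신 + 각각 더해주는 함수
--
--     max_pop = 0
--
--     for i in range(N):
--
--         for j in range(M):
--
--             sum_pop = 0
--             sum_pop += arr[i][j]
--             if i > 0:
--                 sum_pop += arr[i-1][j] # 위가 존재할 때, 위의 값 추가
--
--             if i < N-1:
--                 sum_pop += arr[i+1][j] # 아래가 존재할 때, 아래 값 추가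
--
--             if j > 0:
--                 sum_pop += arr[i][j-1] # 왼쪽이 존재할 때, 왼쪽 값 추가
--
--             if j < M-1:
--                 sum_pop += arr[i][j+1] # 오른쪽이 존재할 때, 오른쪽 값 추가
--
--             if sum_pop > max_pop:
--                 max_pop = sum_pop
--
--     result = max_pop
--
--     return result
-- ===== SOURCE B (Python) =====
-- def max_balloon_pop_wsad(N, M, arr):
--     # Scatter (contribution) formulation: instead of gathering each cell's
--     # plus-shaped sum with bounds checks, every cell pushes its own value
--     # into an accumulator grid at itself and its four in-range neighbours;
--     # the answer is the largest accumulator entry (at least 0).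
--     S = [[0] * M for _ in range(N)]
--     for i in range(N):
--         for j in range(M):
--             v = arr[i][j]
--             for r, c in ((i, j), (i - 1, j), (i + 1, j), (i, j - 1), (i, j + 1)):
--                 if 0 <= r < N and 0 <= c < M:
--                     S[r][c] += v
--     best = 0
--     for row in S:
--         for s in row:
--             if s > best:
--                 best = s
--     return best
-- ===== Notes on version B (the rewrite author's own statement) =====
-- stated objective: alternative
-- what changed: A gathers each cell's plus-shaped sum with four per-cell boundary checks; B inverts the data flow: it scatters every cell's value into a fresh accumulator grid at the cell and its in-range neighbours, then takes the maximum accumulator entry in a separate pass.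
import Mathlib
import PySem

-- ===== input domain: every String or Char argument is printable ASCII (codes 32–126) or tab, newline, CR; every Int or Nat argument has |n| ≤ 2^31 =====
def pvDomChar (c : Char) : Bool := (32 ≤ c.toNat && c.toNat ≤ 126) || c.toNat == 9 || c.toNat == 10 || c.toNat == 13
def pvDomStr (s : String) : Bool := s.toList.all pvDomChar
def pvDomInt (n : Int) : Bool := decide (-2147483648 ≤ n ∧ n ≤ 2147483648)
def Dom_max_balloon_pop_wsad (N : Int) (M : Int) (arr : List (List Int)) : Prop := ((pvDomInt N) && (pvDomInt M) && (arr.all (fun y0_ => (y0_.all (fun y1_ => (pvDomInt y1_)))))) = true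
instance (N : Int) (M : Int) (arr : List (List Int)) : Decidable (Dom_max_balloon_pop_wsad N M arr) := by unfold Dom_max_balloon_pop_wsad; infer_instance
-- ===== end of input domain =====

-- B replaces A's gather-with-bounds-checks by a scatter: each cell adds its value into a fresh accumulator grid at itself and its in-range neighbours, then a separate pass takes the max; objective: alternative, same cost.


-- ===== PORT A =====
-- arr[i][j]; every read A and B perform is in range on Pre_-admitted inputs
def pvV (arr : List (List Int)) (i : Int) (j : Int) : Int :=
  PySem.List.pyGetD (PySem.List.pyGetD arr i []) j 0

-- the body of A's inner loop: sum_pop after the four guarded additions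
def pvS (N : Int) (M : Int) (arr : List (List Int)) (i : Int) (j : Int) : Int :=
  let sum_pop : Int := 0
  let sum_pop := sum_pop + pvV arr i j
  let sum_pop := if i > 0 then sum_pop + pvV arr (i-1) j else sum_pop
  let sum_pop := if i < N-1 then sum_pop + pvV arr (i+1) j else sum_pop
  let sum_pop := if j > 0 then sum_pop + pvV arr i (j-1) else sum_pop
  let sum_pop := if j < M-1 then sum_pop + pvV arr i (j+1) else sum_pop
  sum_pop

def max_balloon_pop_wsad (N : Int) (M : Int) (arr : List (List Int)) : Int :=
  (PySem.List.pyRange 0 N 1).foldl (fun max_pop i =>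
    (PySem.List.pyRange 0 M 1).foldl (fun max_pop j =>
      let sum_pop := pvS N M arr i j
      if sum_pop > max_pop then sum_pop else max_pop) max_pop) 0

-- ===== PORT B =====
-- 'if 0 <= r < N and 0 <= c < M: S[r][c] += v'; under the guard both indices
-- are nonnegative and in range, so .toNat with List.modify is exact
def pvBump (N : Int) (M : Int) (v : Int) (S : List (List Int)) (rc : Int × Int) : List (List Int) :=
  if 0 ≤ rc.1 ∧ rc.1 < N ∧ 0 ≤ rc.2 ∧ rc.2 < M then
    S.modify rc.1.toNat (fun row => row.modify rc.2.toNat (fun x => x + v))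
  else S

def max_balloon_pop_wsad_alt (N : Int) (M : Int) (arr : List (List Int)) : Int :=
  -- S = [[0]*M for _ in range(N)]  (range(N) and [0]*M are empty for N,M ≤ 0, as is .toNat)
  let S0 : List (List Int) := List.replicate N.toNat (List.replicate M.toNat 0)
  let S := (PySem.List.pyRange 0 N 1).foldl (fun S i =>
    (PySem.List.pyRange 0 M 1).foldl (fun S j =>
      [(i, j), (i-1, j), (i+1, j), (i, j-1), (i, j+1)].foldl (pvBump N M (pvV arr i j)) S) S) S0
  S.foldl (fun best row => row.foldl (fun b s => if s > b then s else b) best) 0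

-- ===== PRECONDITION & SPEC =====
-- Pre_ excludes exactly the inputs where the Pythons raise IndexError: a positive
-- N×M demanded but arr has fewer than N rows or one of its first N rows has fewer than M entries.
def Pre_max_balloon_pop_wsad (N : Int) (M : Int) (arr : List (List Int)) : Prop :=
  0 < N → 0 < M → (N ≤ arr.length ∧ ∀ r ∈ arr.take N.toNat, M ≤ r.length)
instance (N : Int) (M : Int) (arr : List (List Int)) : Decidable (Pre_max_balloon_pop_wsad N M arr) := by
  unfold Pre_max_balloon_pop_wsad; infer_instance
def pvWitness_max_balloon_pop_wsad : Int × Int × List (List Int) := (2, 2, [[1, 2], [3, 4]])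

def Spec_max_balloon_pop_wsad (N : Int) (M : Int) (arr : List (List Int)) (out : Int) : Prop := out = max_balloon_pop_wsad_alt N M arr
instance (N : Int) (M : Int) (arr : List (List Int)) (out : Int) : Decidable (Spec_max_balloon_pop_wsad N M arr out) := by unfold Spec_max_balloon_pop_wsad; infer_instance

-- ===== CLAIM (what is proved, stated in full; the proofs are below) =====
def Claim_equal_max_balloon_pop_wsad : Prop := ∀ (N : Int) (M : Int) (arr : List (List Int)), Dom_max_balloon_pop_wsad N M arr → Pre_max_balloon_pop_wsad N M arr → Spec_max_balloon_pop_wsad N M arr (max_balloon_pop_wsad N M arr)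

-- ===== LEMMAS AND PROOFS =====

-- the (k,l) entry of the accumulator grid
def pvEntry (S : List (List Int)) (k : Nat) (l : Nat) : Int := (S.getD k []).getD l 0

-- the accumulator grid always has N rows of M entries
def pvShape (N : Int) (M : Int) (S : List (List Int)) : Prop :=
  S.length = N.toNat ∧ ∀ k : Nat, k < S.length → (S.getD k []).length = M.toNat

-- what cell (i,j) contributes to entry (k,l): its value once per bump whose target is (k,l)
def pvContrib (arr : List (List Int)) (i : Int) (j : Int) (k : Nat) (l : Nat) : Int :=
  (if i = (k:Int) ∧ j = (l:Int) then pvV arr i j else 0)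
  + (if i - 1 = (k:Int) ∧ j = (l:Int) then pvV arr i j else 0)
  + (if i + 1 = (k:Int) ∧ j = (l:Int) then pvV arr i j else 0)
  + (if i = (k:Int) ∧ j - 1 = (l:Int) then pvV arr i j else 0)
  + (if i = (k:Int) ∧ j + 1 = (l:Int) then pvV arr i j else 0)

theorem pv_getD_modify {α : Type} (d : α) (S : List α) (a : Nat) (g : α → α) (k : Nat) :
    (S.modify a g).getD k d = if a = k ∧ k < S.length then g (S.getD k d) else S.getD k d := by
  rw [List.getD_eq_getElem?_getD, List.getElem?_modify, List.getD_eq_getElem?_getD]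
  by_cases h : k < S.length
  · rw [List.getElem?_eq_getElem h]
    by_cases ha : a = k <;> simp [ha, h]
  · rw [List.getElem?_eq_none (by omega)]
    simp [h]

theorem pvBump_shape (N M v : Int) (S : List (List Int)) (rc : Int × Int)
    (hS : pvShape N M S) : pvShape N M (pvBump N M v S rc) := by
  rw [pvBump]
  split_ifs with h
  · refine ⟨by rw [List.length_modify]; exact hS.1, ?_⟩
    intro k hk
    rw [List.length_modify] at hk
    rw [pv_getD_modify]
    split_ifs with h2
    · rw [List.length_modify]; exact hS.2 k hk
    · exact hS.2 k hk
  · exact hS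

theorem pvBump_entry (N M v : Int) (S : List (List Int)) (r c : Int) (k l : Nat)
    (hk : (k:Int) < N) (hl : (l:Int) < M) (hS : pvShape N M S) :
    pvEntry (pvBump N M v S (r, c)) k l
      = pvEntry S k l + (if r = (k:Int) ∧ c = (l:Int) then v else 0) := by
  rw [pvBump]
  by_cases hg : 0 ≤ r ∧ r < N ∧ 0 ≤ c ∧ c < M
  · rw [if_pos hg, pvEntry, pvEntry, pv_getD_modify]
    by_cases hr : r = (k:Int)
    · have hrk : r.toNat = k := by omega
      have hkS : k < S.length := by rw [hS.1]; omega
      rw [if_pos ⟨hrk, hkS⟩, pv_getD_modify]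
      by_cases hc : c = (l:Int)
      · have hcl : c.toNat = l := by omega
        have hlr : l < (S.getD k []).length := by rw [hS.2 k hkS]; omega
        rw [if_pos ⟨hcl, hlr⟩, if_pos ⟨hr, hc⟩]
      · have hcl : ¬ (c.toNat = l ∧ l < (S.getD k []).length) := by
          intro h; exact hc (by omega)
        rw [if_neg hcl, if_neg (by tauto)]
        ring
    · have hne : ¬ (r.toNat = k ∧ k < S.length) := by intro h; exact hr (by omega)
      rw [if_neg hne, if_neg (by tauto)]
      ring
  · rw [if_neg hg, if_neg (by intro h; exact hg ⟨by omega, by omega, by omega, by omega⟩)]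
    ring

theorem pvStep_shape (N M : Int) (arr : List (List Int)) (i j : Int) (S : List (List Int))
    (hS : pvShape N M S) :
    pvShape N M ([(i, j), (i-1, j), (i+1, j), (i, j-1), (i, j+1)].foldl (pvBump N M (pvV arr i j)) S) := by
  simp only [List.foldl_cons, List.foldl_nil]
  exact pvBump_shape _ _ _ _ _ (pvBump_shape _ _ _ _ _ (pvBump_shape _ _ _ _ _
    (pvBump_shape _ _ _ _ _ (pvBump_shape _ _ _ _ _ hS))))

theorem pvStep_entry (N M : Int) (arr : List (List Int)) (i j : Int) (S : List (List Int))
    (k l : Nat) (hk : (k:Int) < N) (hl : (l:Int) < M) (hS : pvShape N M S) :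
    pvEntry ([(i, j), (i-1, j), (i+1, j), (i, j-1), (i, j+1)].foldl (pvBump N M (pvV arr i j)) S) k l
      = pvEntry S k l + pvContrib arr i j k l := by
  have s1 := pvBump_shape N M (pvV arr i j) S (i, j) hS
  have s2 := pvBump_shape N M (pvV arr i j) _ (i-1, j) s1
  have s3 := pvBump_shape N M (pvV arr i j) _ (i+1, j) s2
  have s4 := pvBump_shape N M (pvV arr i j) _ (i, j-1) s3
  simp only [List.foldl_cons, List.foldl_nil]
  rw [pvBump_entry N M _ _ _ _ k l hk hl s4, pvBump_entry N M _ _ _ _ k l hk hl s3,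
    pvBump_entry N M _ _ _ _ k l hk hl s2, pvBump_entry N M _ _ _ _ k l hk hl s1,
    pvBump_entry N M _ _ _ _ k l hk hl hS, pvContrib]
  ring

theorem pvInner_shape (N M : Int) (arr : List (List Int)) (i : Int) :
    ∀ (js : List Int) (S : List (List Int)), pvShape N M S →
    pvShape N M (js.foldl (fun S j =>
      [(i, j), (i-1, j), (i+1, j), (i, j-1), (i, j+1)].foldl (pvBump N M (pvV arr i j)) S) S) := by
  intro js
  induction js with
  | nil => intro S hS; exact hS
  | cons j js ih =>
    intro S hS
    exact ih _ (pvStep_shape N M arr i j S hS)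

theorem pvInner_entry (N M : Int) (arr : List (List Int)) (i : Int) (k l : Nat)
    (hk : (k:Int) < N) (hl : (l:Int) < M) :
    ∀ (js : List Int) (S : List (List Int)), pvShape N M S →
    pvEntry (js.foldl (fun S j =>
      [(i, j), (i-1, j), (i+1, j), (i, j-1), (i, j+1)].foldl (pvBump N M (pvV arr i j)) S) S) k l
      = pvEntry S k l + (js.map (fun j => pvContrib arr i j k l)).sum := by
  intro js
  induction js with
  | nil => intro S hS; simp
  | cons j js ih =>
    intro S hS
    rw [List.foldl_cons, ih _ (pvStep_shape N M arr i j S hS),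
      pvStep_entry N M arr i j S k l hk hl hS, List.map_cons, List.sum_cons]
    ring

theorem pvOuter_shape (N M : Int) (arr : List (List Int)) :
    ∀ (is : List Int) (S : List (List Int)), pvShape N M S →
    pvShape N M (is.foldl (fun S i => (PySem.List.pyRange 0 M 1).foldl (fun S j =>
      [(i, j), (i-1, j), (i+1, j), (i, j-1), (i, j+1)].foldl (pvBump N M (pvV arr i j)) S) S) S) := by
  intro is
  induction is with
  | nil => intro S hS; exact hS
  | cons i is ih =>
    intro S hS
    exact ih _ (pvInner_shape N M arr i _ S hS)

theorem pvOuter_entry (N M : Int) (arr : List (List Int)) (k l : Nat)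
    (hk : (k:Int) < N) (hl : (l:Int) < M) :
    ∀ (is : List Int) (S : List (List Int)), pvShape N M S →
    pvEntry (is.foldl (fun S i => (PySem.List.pyRange 0 M 1).foldl (fun S j =>
      [(i, j), (i-1, j), (i+1, j), (i, j-1), (i, j+1)].foldl (pvBump N M (pvV arr i j)) S) S) S) k l
      = pvEntry S k l
        + (is.map (fun i => ((PySem.List.pyRange 0 M 1).map (fun j => pvContrib arr i j k l)).sum)).sum := by
  intro is
  induction is with
  | nil => intro S hS; simp
  | cons i is ih =>
    intro S hS
    rw [List.foldl_cons, ih _ (pvInner_shape N M arr i _ S hS),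
      pvInner_entry N M arr i k l hk hl _ S hS, List.map_cons, List.sum_cons]
    ring

theorem pv_sum_pick_nat (n : Nat) (t : Int) (P : Prop) [Decidable P] (f : Int → Int) :
    ((List.range n).map (fun j : Nat => if P ∧ (j:Int) = t then f (j:Int) else 0)).sum
      = if P ∧ 0 ≤ t ∧ t < (n:Int) then f t else 0 := by
  induction n with
  | zero =>
    rw [if_neg (by intro h; omega)]
    simp
  | succ n ih =>
    rw [List.range_succ, List.map_append, List.sum_append, ih]
    simp only [List.map_cons, List.map_nil, List.sum_cons, List.sum_nil, add_zero]
    by_cases hP : P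
    · by_cases ht : t = (n:Int)
      · rw [if_neg (fun h => by have := h.2.2; omega), if_pos ⟨hP, ht.symm⟩,
          if_pos (show P ∧ 0 ≤ t ∧ t < ((n+1 : Nat):Int) from ⟨hP, by omega, by omega⟩), ht]
        simp
      · by_cases hb : 0 ≤ t ∧ t < (n:Int)
        · rw [if_pos ⟨hP, hb⟩, if_neg (fun h => ht h.2.symm),
            if_pos (show P ∧ 0 ≤ t ∧ t < ((n+1 : Nat):Int) from ⟨hP, by omega, by omega⟩)]
          simp
        · rw [if_neg (fun h => hb h.2), if_neg (fun h => ht h.2.symm),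
            if_neg (show ¬(P ∧ 0 ≤ t ∧ t < ((n+1 : Nat):Int)) from
              fun h => hb ⟨h.2.1, by have := h.2.2; omega⟩)]
          simp
    · rw [if_neg (fun h => hP h.1), if_neg (fun h => hP h.1), if_neg (fun h => hP h.1)]; simp

theorem pv_sum_pick (n t : Int) (P : Prop) [Decidable P] (f : Int → Int) :
    ((PySem.List.pyRange 0 n 1).map (fun j => if P ∧ j = t then f j else 0)).sum
      = if P ∧ 0 ≤ t ∧ t < n then f t else 0 := by
  rw [PySem.List.pyRange_one, List.map_map]
  have h1 : ((fun j => if P ∧ j = t then f j else 0) ∘ fun k : Nat => (0:Int) + k)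
      = fun j : Nat => if P ∧ (j:Int) = t then f (j:Int) else 0 := by
    funext j; simp
  rw [h1, pv_sum_pick_nat ((n - 0).toNat) t P f]
  refine if_congr (and_congr_right fun _ => and_congr_right fun _ => by omega) rfl rfl

-- the scatter total at (k,l) equals A's gathered plus-sum there
theorem pv_total_eq_pvS (N M : Int) (arr : List (List Int)) (k l : Nat)
    (hk : (k:Int) < N) (hl : (l:Int) < M) :
    ((PySem.List.pyRange 0 N 1).map (fun i =>
      ((PySem.List.pyRange 0 M 1).map (fun j => pvContrib arr i j k l)).sum)).sum
      = pvS N M arr (k:Int) (l:Int) := by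
  have hinner : ∀ i : Int,
      ((PySem.List.pyRange 0 M 1).map (fun j => pvContrib arr i j k l)).sum
      = (if (0 ≤ (l:Int) ∧ (l:Int) < M) ∧ i = (k:Int) then pvV arr i (l:Int) else 0)
        + ((if (0 ≤ (l:Int) ∧ (l:Int) < M) ∧ i = (k:Int)+1 then pvV arr i (l:Int) else 0)
        + ((if (0 ≤ (l:Int) ∧ (l:Int) < M) ∧ i = (k:Int)-1 then pvV arr i (l:Int) else 0)
        + ((if (0 ≤ (l:Int)+1 ∧ (l:Int)+1 < M) ∧ i = (k:Int) then pvV arr i ((l:Int)+1) else 0)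
        + (if (0 ≤ (l:Int)-1 ∧ (l:Int)-1 < M) ∧ i = (k:Int) then pvV arr i ((l:Int)-1) else 0)))) := by
    intro i
    have e1 : (fun j : Int => pvContrib arr i j k l)
        = fun j : Int =>
          (if (i = (k:Int)) ∧ j = (l:Int) then pvV arr i j else 0)
          + ((if (i - 1 = (k:Int)) ∧ j = (l:Int) then pvV arr i j else 0)
          + ((if (i + 1 = (k:Int)) ∧ j = (l:Int) then pvV arr i j else 0)
          + ((if (i = (k:Int)) ∧ j = (l:Int)+1 then pvV arr i j else 0)
          + (if (i = (k:Int)) ∧ j = (l:Int)-1 then pvV arr i j else 0)))) := by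
      funext j
      rw [pvContrib,
        if_congr (show (i = (k:Int) ∧ j - 1 = (l:Int)) ↔ ((i = (k:Int)) ∧ j = (l:Int)+1) by omega) rfl rfl,
        if_congr (show (i = (k:Int) ∧ j + 1 = (l:Int)) ↔ ((i = (k:Int)) ∧ j = (l:Int)-1) by omega) rfl rfl]
      ring
    rw [e1, List.sum_map_add, List.sum_map_add, List.sum_map_add, List.sum_map_add,
      pv_sum_pick M ((l:Int)) (i = (k:Int)) (fun j => pvV arr i j),
      pv_sum_pick M ((l:Int)) (i - 1 = (k:Int)) (fun j => pvV arr i j),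
      pv_sum_pick M ((l:Int)) (i + 1 = (k:Int)) (fun j => pvV arr i j),
      pv_sum_pick M ((l:Int)+1) (i = (k:Int)) (fun j => pvV arr i j),
      pv_sum_pick M ((l:Int)-1) (i = (k:Int)) (fun j => pvV arr i j),
      if_congr (show ((i = (k:Int)) ∧ 0 ≤ (l:Int) ∧ (l:Int) < M) ↔
        ((0 ≤ (l:Int) ∧ (l:Int) < M) ∧ i = (k:Int)) by omega) rfl rfl,
      if_congr (show ((i - 1 = (k:Int)) ∧ 0 ≤ (l:Int) ∧ (l:Int) < M) ↔
        ((0 ≤ (l:Int) ∧ (l:Int) < M) ∧ i = (k:Int)+1) by omega) rfl rfl,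
      if_congr (show ((i + 1 = (k:Int)) ∧ 0 ≤ (l:Int) ∧ (l:Int) < M) ↔
        ((0 ≤ (l:Int) ∧ (l:Int) < M) ∧ i = (k:Int)-1) by omega) rfl rfl,
      if_congr (show ((i = (k:Int)) ∧ 0 ≤ (l:Int)+1 ∧ (l:Int)+1 < M) ↔
        ((0 ≤ (l:Int)+1 ∧ (l:Int)+1 < M) ∧ i = (k:Int)) by omega) rfl rfl,
      if_congr (show ((i = (k:Int)) ∧ 0 ≤ (l:Int)-1 ∧ (l:Int)-1 < M) ↔
        ((0 ≤ (l:Int)-1 ∧ (l:Int)-1 < M) ∧ i = (k:Int)) by omega) rfl rfl]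
  have hfn : (fun i : Int => ((PySem.List.pyRange 0 M 1).map (fun j => pvContrib arr i j k l)).sum)
      = fun i : Int =>
        (if (0 ≤ (l:Int) ∧ (l:Int) < M) ∧ i = (k:Int) then pvV arr i (l:Int) else 0)
        + ((if (0 ≤ (l:Int) ∧ (l:Int) < M) ∧ i = (k:Int)+1 then pvV arr i (l:Int) else 0)
        + ((if (0 ≤ (l:Int) ∧ (l:Int) < M) ∧ i = (k:Int)-1 then pvV arr i (l:Int) else 0)
        + ((if (0 ≤ (l:Int)+1 ∧ (l:Int)+1 < M) ∧ i = (k:Int) then pvV arr i ((l:Int)+1) else 0)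
        + (if (0 ≤ (l:Int)-1 ∧ (l:Int)-1 < M) ∧ i = (k:Int) then pvV arr i ((l:Int)-1) else 0)))) := by
    funext i; exact hinner i
  rw [hfn, List.sum_map_add, List.sum_map_add, List.sum_map_add, List.sum_map_add,
    pv_sum_pick N ((k:Int)) (0 ≤ (l:Int) ∧ (l:Int) < M) (fun i => pvV arr i (l:Int)),
    pv_sum_pick N ((k:Int)+1) (0 ≤ (l:Int) ∧ (l:Int) < M) (fun i => pvV arr i (l:Int)),
    pv_sum_pick N ((k:Int)-1) (0 ≤ (l:Int) ∧ (l:Int) < M) (fun i => pvV arr i (l:Int)),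
    pv_sum_pick N ((k:Int)) (0 ≤ (l:Int)+1 ∧ (l:Int)+1 < M) (fun i => pvV arr i ((l:Int)+1)),
    pv_sum_pick N ((k:Int)) (0 ≤ (l:Int)-1 ∧ (l:Int)-1 < M) (fun i => pvV arr i ((l:Int)-1)),
    if_pos (show ((0 ≤ (l:Int) ∧ (l:Int) < M) ∧ 0 ≤ (k:Int) ∧ (k:Int) < N) from
      ⟨⟨by omega, hl⟩, by omega, hk⟩),
    if_congr (show (((0 ≤ (l:Int) ∧ (l:Int) < M) ∧ 0 ≤ (k:Int)+1 ∧ (k:Int)+1 < N) ↔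
      ((k:Int) < N - 1)) by omega) rfl rfl,
    if_congr (show (((0 ≤ (l:Int) ∧ (l:Int) < M) ∧ 0 ≤ (k:Int)-1 ∧ (k:Int)-1 < N) ↔
      ((k:Int) > 0)) by omega) rfl rfl,
    if_congr (show (((0 ≤ (l:Int)+1 ∧ (l:Int)+1 < M) ∧ 0 ≤ (k:Int) ∧ (k:Int) < N) ↔
      ((l:Int) < M - 1)) by omega) rfl rfl,
    if_congr (show (((0 ≤ (l:Int)-1 ∧ (l:Int)-1 < M) ∧ 0 ≤ (k:Int) ∧ (k:Int) < N) ↔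
      ((l:Int) > 0)) by omega) rfl rfl]
  simp only [pvS, zero_add]
  split_ifs <;> ring

-- the final accumulator grid is exactly the grid of A's plus-sums
theorem pvFinal_eq (N M : Int) (arr : List (List Int)) :
    (PySem.List.pyRange 0 N 1).foldl (fun S i => (PySem.List.pyRange 0 M 1).foldl (fun S j =>
      [(i, j), (i-1, j), (i+1, j), (i, j-1), (i, j+1)].foldl (pvBump N M (pvV arr i j)) S) S)
      (List.replicate N.toNat (List.replicate M.toNat 0))
    = (List.range N.toNat).map (fun k : Nat =>
        (List.range M.toNat).map (fun l : Nat => pvS N M arr (k:Int) (l:Int))) := by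
  have hS0 : pvShape N M (List.replicate N.toNat (List.replicate M.toNat (0:Int))) := by
    refine ⟨by simp, ?_⟩
    intro k hk
    rw [List.length_replicate] at hk
    rw [List.getD_eq_getElem _ _ (by simpa using hk), List.getElem_replicate, List.length_replicate]
  have hshape := pvOuter_shape N M arr (PySem.List.pyRange 0 N 1) _ hS0
  apply List.ext_getElem
  · rw [hshape.1]; simp
  · intro k h1 h2
    have hk : k < N.toNat := by simpa using h2
    have hkI : (k:Int) < N := by omega
    rw [List.getElem_map, List.getElem_range]
    apply List.ext_getElem
    · have := hshape.2 k (by rw [hshape.1]; exact hk)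
      rw [List.getD_eq_getElem _ _ h1] at this
      rw [this]; simp
    · intro l h3 h4
      have hl : l < M.toNat := by simpa using h4
      have hlI : (l:Int) < M := by omega
      rw [List.getElem_map, List.getElem_range]
      have hget :
          (((PySem.List.pyRange 0 N 1).foldl (fun S i => (PySem.List.pyRange 0 M 1).foldl (fun S j =>
            [(i, j), (i-1, j), (i+1, j), (i, j-1), (i, j+1)].foldl (pvBump N M (pvV arr i j)) S) S)
            (List.replicate N.toNat (List.replicate M.toNat 0)))[k]'h1)[l]'h3
          = pvEntry ((PySem.List.pyRange 0 N 1).foldl (fun S i => (PySem.List.pyRange 0 M 1).foldl (fun S j =>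
            [(i, j), (i-1, j), (i+1, j), (i, j-1), (i, j+1)].foldl (pvBump N M (pvV arr i j)) S) S)
            (List.replicate N.toNat (List.replicate M.toNat 0))) k l := by
        rw [pvEntry, List.getD_eq_getElem _ _ h1, List.getD_eq_getElem _ _ h3]
      rw [hget, pvOuter_entry N M arr k l hkI hlI _ _ hS0,
        pv_total_eq_pvS N M arr k l hkI hlI]
      have hz : pvEntry (List.replicate N.toNat (List.replicate M.toNat (0:Int))) k l = 0 := by
        rw [pvEntry]
        have hrow : (List.replicate N.toNat (List.replicate M.toNat (0:Int))).getD k []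
            = List.replicate M.toNat 0 := by
          rw [List.getD_eq_getElem _ _ (by simpa using hk), List.getElem_replicate]
        rw [hrow]
        simp
      rw [hz]
      ring

theorem pvAlt_eq (N M : Int) (arr : List (List Int)) :
    max_balloon_pop_wsad_alt N M arr
      = ((List.range N.toNat).map (fun k : Nat =>
          (List.range M.toNat).map (fun l : Nat => pvS N M arr (k:Int) (l:Int)))).foldl
        (fun best row => row.foldl (fun b s => if s > b then s else b) best) 0 := by
  unfold max_balloon_pop_wsad_alt
  simp only [pvFinal_eq]

-- ===== VERDICT (by name: the statement is the Claim_ definition above) =====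
theorem max_balloon_pop_wsad_spec : Claim_equal_max_balloon_pop_wsad := by
  intro N M arr _ _
  unfold Spec_max_balloon_pop_wsad
  rw [pvAlt_eq, max_balloon_pop_wsad, PySem.List.pyRange_one 0 N, PySem.List.pyRange_one 0 M]
  simp only [List.foldl_map, Int.sub_zero, zero_add]
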